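-- pv_equiv track=rewrite | github.com/kiriisomer/console-mahjong-game | src/rule.py | can_pon
-- ===== SOURCE A (Python) =====
-- def can_pon(tehai, sutehai) -> list[list[int]]:
--     """判断手牌里能否碰目标牌，返回所有的可能碰的牌的索引列表。（一般只有一种）"""
--     # 手牌不够两张无法判断，肯定不能碰。
--     if len(tehai) < 2:
--         return []
--
--     result = []
--     for i in range(len(tehai) - 1):
--         if tehai[i] == tehai[i + 1] == sutehai:
--             result.append([i, i + 1])
--     return result
-- ===== SOURCE B (Python) =====
-- def can_pon(tehai, sutehai) -> list[list[int]]: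
--     """Collect the positions matching the discarded tile, then pair up
--     consecutive positions.  Same result as the adjacent-scan version."""
--     idx = [i for i, t in enumerate(tehai) if t == sutehai]
--     return [[i, j] for i, j in zip(idx, idx[1:]) if j == i + 1]
-- ===== Notes on version B (the rewrite author's own statement) =====
-- stated objective: simpler
-- what changed: Instead of scanning adjacent hand positions for a pair equal to the discard, B first collects all matching positions and then pairs up consecutive entries of that index list, dropping the explicit short-hand guard.
import Mathlib
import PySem

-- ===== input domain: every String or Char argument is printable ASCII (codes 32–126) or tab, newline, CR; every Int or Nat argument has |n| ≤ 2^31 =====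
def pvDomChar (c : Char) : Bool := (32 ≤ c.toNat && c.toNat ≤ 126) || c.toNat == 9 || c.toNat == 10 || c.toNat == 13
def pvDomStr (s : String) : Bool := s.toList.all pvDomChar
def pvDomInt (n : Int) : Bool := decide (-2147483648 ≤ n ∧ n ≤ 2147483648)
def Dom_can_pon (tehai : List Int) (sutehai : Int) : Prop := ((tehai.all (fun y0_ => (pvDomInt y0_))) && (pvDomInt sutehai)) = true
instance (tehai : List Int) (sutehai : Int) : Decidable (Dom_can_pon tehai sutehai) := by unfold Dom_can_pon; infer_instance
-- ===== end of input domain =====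

-- B replaces A's adjacent-position scan by "collect matching indices, then pair consecutive ones" (objective: simpler).

-- ===== PORT A =====
-- literal port of A: guard on len < 2, then for i in range(len-1) append [i, i+1] when tehai[i] == tehai[i+1] == sutehai
def can_pon (tehai : List Int) (sutehai : Int) : List (List Int) :=
  if tehai.length < 2 then []
  else
    (PySem.List.pyRange 0 ((tehai.length : Int) - 1) 1).foldl
      (fun result i =>
        if (PySem.List.pyGetD tehai i 0 == PySem.List.pyGetD tehai (i + 1) 0
            && PySem.List.pyGetD tehai (i + 1) 0 == sutehai)
        then result ++ [[i, i + 1]] else result) []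

-- ===== PORT B =====
-- literal port of B: idx = [i for i, t in enumerate(tehai) if t == sutehai];
-- return [[i, j] for i, j in zip(idx, idx[1:]) if j == i + 1]
def can_pon_alt (tehai : List Int) (sutehai : Int) : List (List Int) :=
  let idx : List Int :=
    ((PySem.List.enumerate tehai 0).filter (fun p => p.2 == sutehai)).map (fun p => p.1)
  ((idx.zip (PySem.List.slice idx (some 1) none)).filter (fun p => p.2 == p.1 + 1)).map
    (fun p => [p.1, p.2])

-- ===== PRECONDITION & SPEC =====
def Spec_can_pon (tehai : List Int) (sutehai : Int) (out : List (List Int)) : Prop := out = can_pon_alt tehai sutehai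
instance (tehai : List Int) (sutehai : Int) (out : List (List Int)) : Decidable (Spec_can_pon tehai sutehai out) := by unfold Spec_can_pon; infer_instance

-- ===== CLAIM (what is proved, stated in full; the proofs are below) =====
def Claim_equal_can_pon : Prop := ∀ (tehai : List Int) (sutehai : Int), Dom_can_pon tehai sutehai → Spec_can_pon tehai sutehai (can_pon tehai sutehai)

-- ===== LEMMAS AND PROOFS =====

/-- Proof-only helper: pair up consecutive entries of an index list. -/
def pairAdj : List Int → List (List Int)
  | i :: j :: rest => if j = i + 1 then [i, j] :: pairAdj (j :: rest) else pairAdj (j :: rest)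
  | _ => []

theorem pairAdj_zip (l : List Int) :
    ((l.zip l.tail).filter (fun p => p.2 == p.1 + 1)).map (fun p => [p.1, p.2]) = pairAdj l := by
  induction l with
  | nil => rfl
  | cons x l ih =>
    cases l with
    | nil => rfl
    | cons y r =>
      have ih' : (((y :: r).zip r).filter (fun p => p.2 == p.1 + 1)).map
          (fun p => [p.1, p.2]) = pairAdj (y :: r) := by simpa using ih
      by_cases h : y = x + 1
      · subst h
        simp [pairAdj, ih']
      · simp [pairAdj, h, ih']

theorem pairAdj_cons_of_ne (a : Int) (M : List Int) (h : ∀ j ∈ M, j ≠ a + 1) :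
    pairAdj (a :: M) = pairAdj M := by
  cases M with
  | nil => rfl
  | cons j r =>
    have hj : j ≠ a + 1 := h j (by simp)
    simp [pairAdj, hj]

/-- Main lemma: pairing consecutive survivors of a filtered range equals
    filtering the shortened range on "both i and i+1 survive". -/
theorem pairAdj_filter_pyRange (q : Int → Bool) (b : Int) :
    ∀ (n : Nat) (a : Int), (b - a).toNat ≤ n →
      pairAdj ((PySem.List.pyRange a b 1).filter q) =
        ((PySem.List.pyRange a (b - 1) 1).filter (fun i => q i && q (i + 1))).map
          (fun i => [i, i + 1]) := by
  intro n
  induction n with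
  | zero =>
    intro a h
    have hba : b ≤ a := by omega
    rw [PySem.List.pyRange_one_eq_nil hba, PySem.List.pyRange_one_eq_nil (by omega : b - 1 ≤ a)]
    rfl
  | succ n ih =>
    intro a h
    by_cases hab : b ≤ a
    · rw [PySem.List.pyRange_one_eq_nil hab, PySem.List.pyRange_one_eq_nil (by omega : b - 1 ≤ a)]
      rfl
    · push Not at hab
      rw [PySem.List.pyRange_one_cons hab]
      by_cases hb1 : b ≤ a + 1
      · -- singleton range
        have : PySem.List.pyRange (a + 1) b 1 = [] := PySem.List.pyRange_one_eq_nil hb1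
        rw [this, PySem.List.pyRange_one_eq_nil (by omega : b - 1 ≤ a)]
        by_cases hqa : q a = true <;> simp [hqa, pairAdj]
      · push Not at hb1
        have hstep : (b - (a + 1)).toNat ≤ n := by omega
        by_cases hqa : q a = true
        · rw [List.filter_cons_of_pos hqa]
          rw [PySem.List.pyRange_one_cons hb1]
          have hcons : PySem.List.pyRange a (b - 1) 1 = a :: PySem.List.pyRange (a + 1) (b - 1) 1 :=
            PySem.List.pyRange_one_cons (by omega)
          by_cases hq1 : q (a + 1) = true
          · rw [List.filter_cons_of_pos hq1]
            have : pairAdj (a :: (a + 1) :: ((PySem.List.pyRange (a + 1 + 1) b 1).filter q)) =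
                [a, a + 1] :: pairAdj ((a + 1) :: ((PySem.List.pyRange (a + 1 + 1) b 1).filter q)) := by
              simp [pairAdj]
            rw [this]
            have hIH := ih (a + 1) hstep
            rw [PySem.List.pyRange_one_cons hb1, List.filter_cons_of_pos hq1] at hIH
            rw [hIH, hcons, List.filter_cons_of_pos (by simp [hqa, hq1]), List.map_cons]
          · rw [List.filter_cons_of_neg (by simp [hq1])]
            have hne : ∀ j ∈ (PySem.List.pyRange (a + 1 + 1) b 1).filter q, j ≠ a + 1 := by
              intro j hj
              have := (PySem.List.mem_pyRange_one).1 (List.mem_of_mem_filter hj)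
              omega
            rw [pairAdj_cons_of_ne a _ hne]
            have hIH := ih (a + 1) hstep
            rw [PySem.List.pyRange_one_cons hb1, List.filter_cons_of_neg (by simp [hq1])] at hIH
            rw [hIH, hcons, List.filter_cons_of_neg (by simp [hq1])]
        · rw [List.filter_cons_of_neg (by simp [hqa])]
          have hIH := ih (a + 1) hstep
          rw [hIH]
          have hcons : PySem.List.pyRange a (b - 1) 1 = a :: PySem.List.pyRange (a + 1) (b - 1) 1 :=
            PySem.List.pyRange_one_cons (by omega)
          rw [hcons, List.filter_cons_of_neg (by simp [hqa])]

theorem can_pon_eq_filter_map (tehai : List Int) (sutehai : Int) :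
    can_pon tehai sutehai =
      ((PySem.List.pyRange 0 ((tehai.length : Int) - 1) 1).filter
          (fun i => PySem.List.pyGetD tehai i 0 == PySem.List.pyGetD tehai (i + 1) 0
              && PySem.List.pyGetD tehai (i + 1) 0 == sutehai)).map
        (fun i => [i, i + 1]) := by
  unfold can_pon
  by_cases h : tehai.length < 2
  · rw [if_pos h, PySem.List.pyRange_one_eq_nil (by omega : ((tehai.length : Int) - 1) ≤ 0)]
    rfl
  · rw [if_neg h, PySem.List.foldl_append_if]
    simp

theorem can_pon_alt_eq_pairAdj (tehai : List Int) (sutehai : Int) :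
    can_pon_alt tehai sutehai =
      pairAdj ((PySem.List.pyRange 0 (tehai.length : Int) 1).filter
        (fun i => PySem.List.pyGetD tehai i 0 == sutehai)) := by
  unfold can_pon_alt
  dsimp only
  rw [PySem.List.slice_from_one, pairAdj_zip]
  congr 1
  rw [PySem.List.enumerate_eq_map_pyRange tehai 0, List.filter_map, List.map_map]
  simp only [Function.comp_def]
  simp

-- ===== VERDICT (by name: the statement is the Claim_ definition above) =====
theorem can_pon_spec : Claim_equal_can_pon := by
  intro tehai sutehai _
  unfold Spec_can_pon
  rw [can_pon_eq_filter_map, can_pon_alt_eq_pairAdj]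
  rw [pairAdj_filter_pyRange (fun i => PySem.List.pyGetD tehai i 0 == sutehai)
      ((tehai.length : Int)) ((tehai.length : Int) - 0).toNat 0 (le_refl _)]
  congr 1
  apply List.filter_congr
  intro i _
  by_cases h : PySem.List.pyGetD tehai (i + 1) 0 = sutehai
  · simp [h]
  · have hb : (PySem.List.pyGetD tehai (i + 1) 0 == sutehai) = false := by
      simp [h]
    simp [hb]
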